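-- pv_equiv track=rewrite | github.com/farazaaspl-png/CIQ-check | core/readers/excelreader_Old.py | escape_custom
-- ===== SOURCE A (Python) =====
-- def escape_custom(s: str) -> str:
--     SPECIAL_CHARS = r'.^$*+?{}[]\|()#'
--     escaped = []
--     for ch in s:
--         if ch in SPECIAL_CHARS:
--             escaped.append('\\' + ch)
--         else:
--             escaped.append(ch)
--     return ''.join(escaped)
-- ===== SOURCE B (Python) =====
-- def escape_custom(s: str) -> str:
--     # Staged whole-string passes: one str.replace per special character,
--     # escaping the backslash first so later passes never touch inserted backslashes.
--     for c in '\\.^$*+?{}[]|()#':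
--         s = s.replace(c, '\\' + c)
--     return s
-- ===== Notes on version B (the rewrite author's own statement) =====
-- stated objective: alternative
-- what changed: Replaces A's single character-by-character pass with a membership test and list-append by 15 staged whole-string str.replace passes, one per special character, escaping the backslash first so later passes never touch inserted backslashes.
import Mathlib
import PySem

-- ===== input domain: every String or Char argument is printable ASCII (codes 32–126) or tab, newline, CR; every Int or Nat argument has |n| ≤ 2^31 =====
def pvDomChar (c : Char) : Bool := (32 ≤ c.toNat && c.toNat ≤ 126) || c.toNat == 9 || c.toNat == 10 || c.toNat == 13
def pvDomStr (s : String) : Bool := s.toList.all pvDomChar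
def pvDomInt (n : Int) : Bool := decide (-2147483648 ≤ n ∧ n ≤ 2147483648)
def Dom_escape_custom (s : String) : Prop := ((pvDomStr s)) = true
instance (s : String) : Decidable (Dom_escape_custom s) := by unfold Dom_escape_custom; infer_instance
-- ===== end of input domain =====

-- B replaces A's single character-by-character pass (membership branch + append) by 15 staged
-- whole-string str.replace passes, one per special character, backslash first; same result.

-- ===== PORT A =====
-- literal port of A: loop over the characters, append '\'+ch or ch, join at the end
def escape_custom (s : String) : String :=
  PySem.Str.join ""
    (s.toList.foldl (fun acc ch =>
      if PySem.Str.isIn (String.ofList [ch]) ".^$*+?{}[]\\|()#" then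
        acc ++ [String.ofList ['\\', ch]]          -- '\\' + ch
      else
        acc ++ [String.ofList [ch]]) [])

-- ===== PORT B =====
-- literal port of B: fold the replace passes over the special characters, '\' first
def escape_custom_alt (s : String) : String :=
  ("\\.^$*+?{}[]|()#".toList).foldl
    (fun t c => PySem.Str.replace t (String.ofList [c]) (String.ofList ['\\', c])) s

-- ===== PRECONDITION & SPEC =====
def Spec_escape_custom (s : String) (out : String) : Prop := out = escape_custom_alt s
instance (s : String) (out : String) : Decidable (Spec_escape_custom s out) := by unfold Spec_escape_custom; infer_instance

-- ===== CLAIM (what is proved, stated in full; the proofs are below) =====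
def Claim_equal_escape_custom : Prop := ∀ (s : String), Dom_escape_custom s → Spec_escape_custom s (escape_custom s)

-- ===== LEMMAS AND PROOFS =====

-- the special characters, in B's processing order ('\' first)
def pvSpecials : List Char :=
  ['\\', '.', '^', '$', '*', '+', '?', '{', '}', '[', ']', '|', '(', ')', '#']

theorem pv_specials : ("\\.^$*+?{}[]|()#" : String).toList = pvSpecials := by decide

theorem pv_specialsA :
    (".^$*+?{}[]\\|()#" : String).toList
      = ['.', '^', '$', '*', '+', '?', '{', '}', '[', ']', '\\', '|', '(', ')', '#'] := by decide

-- single-character replacement, list level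
def pvReplC (c : Char) (r : List Char) (xs : List Char) : List Char :=
  xs.flatMap (fun x => if x = c then r else [x])

-- escaping with respect to a set of specials, list level
def pvEsc (spec : List Char) (ch : Char) : List Char :=
  if ch ∈ spec then ['\\', ch] else [ch]

-- PySem.Chars.replace with a single-character pattern is pvReplC
theorem pv_go_single (c : Char) (r : List Char) :
    ∀ (l : List Char) (fuel : Nat) (acc : List Char), l.length ≤ fuel →
      PySem.Chars.replace.go [c] r fuel l acc = acc.reverse ++ pvReplC c r l := by
  intro l
  induction l with
  | nil =>
    intro fuel acc _
    cases fuel <;> simp [PySem.Chars.replace.go, pvReplC]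
  | cons x t ih =>
    intro fuel acc hf
    cases fuel with
    | zero => simp at hf
    | succ n =>
      simp only [PySem.Chars.replace.go]
      by_cases hx : x = c
      · subst hx
        rw [if_pos (by simp [List.isPrefixOf])]
        simp only [List.length_cons, List.length_nil, List.drop_succ_cons, List.drop_zero]
        rw [ih n _ (by simpa using hf)]
        simp [pvReplC]
      · have hp : ¬([c].isPrefixOf (x :: t) = true) := by
          simp only [List.isPrefixOf, Bool.and_true, beq_iff_eq]
          exact fun h => hx h.symm
        rw [if_neg hp]
        rw [ih n _ (by simpa using hf)]
        simp [pvReplC, hx]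

theorem pv_replace_single (c : Char) (r : List Char) (l : List Char) :
    PySem.Chars.replace l [c] r = pvReplC c r l := by
  rw [PySem.Chars.replace]
  simp only [List.isEmpty_cons]
  simpa using pv_go_single c r l l.length [] (le_refl _)

-- one replace pass moves one character from "to do" to "done"
theorem pv_step (spec : List Char) (c : Char) (hnot : c ∉ spec)
    (hbs : spec = [] ∨ c ≠ '\\') (ch : Char) :
    pvReplC c ['\\', c] (pvEsc spec ch) = pvEsc (spec ++ [c]) ch := by
  unfold pvEsc
  by_cases hmem : ch ∈ spec
  · have hc : c ≠ '\\' := by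
      rcases hbs with h | h
      · subst h; simp at hmem
      · exact h
    have hne : ch ≠ c := fun h => hnot (h ▸ hmem)
    simp [hmem, pvReplC, hc.symm, hne]
  · by_cases hch : ch = c
    · subst hch
      simp [hmem, pvReplC]
    · simp [hmem, hch, pvReplC]

-- pvReplC distributes over flatMap
theorem pv_replC_flatMap (c : Char) (r : List Char) (f : Char → List Char) (l : List Char) :
    pvReplC c r (l.flatMap f) = l.flatMap (fun ch => pvReplC c r (f ch)) := by
  unfold pvReplC
  rw [List.flatMap_assoc]

-- the fold of replace passes computes escaping with respect to the whole list
theorem pv_fold_repl :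
    ∀ (L spec : List Char), (∀ c ∈ L, c ∉ spec) → L.Nodup →
      (∀ c ∈ L, c = '\\' → spec = [] ∧ L.head? = some c) →
      ∀ (l : List Char),
        L.foldl (fun t c => pvReplC c ['\\', c] t) (l.flatMap (pvEsc spec))
          = l.flatMap (pvEsc (spec ++ L))
  | [], spec, _, _, _, l => by simp
  | c :: L, spec, h1, h2, h3, l => by
    simp only [List.foldl_cons]
    have hbs : spec = [] ∨ c ≠ '\\' := by
      by_cases hc : c = '\\'
      · exact Or.inl (h3 c (List.mem_cons_self) hc).1
      · exact Or.inr hc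
    rw [pv_replC_flatMap]
    have hstep : (fun ch => pvReplC c ['\\', c] (pvEsc spec ch)) = pvEsc (spec ++ [c]) := by
      funext ch
      exact pv_step spec c (h1 c List.mem_cons_self) hbs ch
    rw [hstep]
    rw [pv_fold_repl L (spec ++ [c])
      (by
        intro d hd hmem
        rcases List.mem_append.mp hmem with h | h
        · exact h1 d (List.mem_cons_of_mem _ hd) h
        · exact (List.nodup_cons.mp h2).1 ((List.mem_singleton.mp h) ▸ hd))
      (List.nodup_cons.mp h2).2
      (by
        intro d hd hdbs
        exfalso
        have := (h3 d (List.mem_cons_of_mem _ hd) hdbs).2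
        simp only [List.head?_cons, Option.some.injEq] at this
        exact (List.nodup_cons.mp h2).1 (this ▸ hd))
      l]
    simp

-- single-character membership: ch in SPECIAL_CHARS ↔ ch is one of its characters
theorem pv_isIn_single (c : Char) (t : String) :
    PySem.Str.isIn (String.ofList [c]) t = true ↔ c ∈ t.toList := by
  rw [PySem.Str.isIn_iff_infix]
  simp only [String.toList_ofList]
  constructor
  · intro h
    exact h.subset (List.mem_singleton_self c)
  · intro h
    obtain ⟨u, v, huv⟩ := List.append_of_mem h
    exact ⟨u, v, by rw [huv]; simp⟩

-- A's per-character branch computes pvEsc pvSpecials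
theorem pv_per_char (c : Char) :
    (if PySem.Str.isIn (String.ofList [c]) ".^$*+?{}[]\\|()#" then
        String.ofList ['\\', c] else String.ofList [c]).toList = pvEsc pvSpecials c := by
  by_cases hc : PySem.Str.isIn (String.ofList [c]) ".^$*+?{}[]\\|()#"
  · rw [if_pos hc]
    have hm := (pv_isIn_single c _).mp hc
    rw [pv_specialsA] at hm
    have hm' : c ∈ pvSpecials := by fin_cases hm <;> decide
    simp [pvEsc, hm']
  · rw [if_neg hc]
    have hm' : c ∉ pvSpecials := by
      intro h
      fin_cases h <;> exact hc (by decide)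
    simp [pvEsc, hm']

-- A's foldl-with-append builds the mapped list
theorem pv_foldl_map (p : Char → Bool) (f g : Char → String) :
    ∀ (cs : List Char) (acc : List String),
      cs.foldl (fun acc ch => if p ch then acc ++ [f ch] else acc ++ [g ch]) acc
        = acc ++ cs.map (fun ch => if p ch then f ch else g ch)
  | [], acc => by simp
  | c :: cs, acc => by
    simp only [List.foldl_cons, List.map_cons]
    rw [pv_foldl_map p f g cs]
    by_cases h : p c <;> simp [h]

theorem pv_interc_nil (l : List (List Char)) :
    List.intercalate ([] : List Char) l = l.flatten := by
  induction l with
  | nil => simp [List.intercalate]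
  | cons x t ih => cases t <;> simp_all [List.intercalate, List.intersperse]

theorem pv_join_toList (parts : List String) :
    (PySem.Str.join "" parts).toList = (parts.map String.toList).flatten := by
  rw [PySem.Str.toList_join]
  have h : ("" : String).toList = [] := by decide
  rw [h]
  simpa [PySem.Chars.join] using pv_interc_nil (parts.map String.toList)

theorem pv_a_toList (s : String) :
    (escape_custom s).toList = s.toList.flatMap (pvEsc pvSpecials) := by
  unfold escape_custom
  rw [pv_foldl_map, List.nil_append, pv_join_toList, List.map_map, List.flatMap_def]
  congr 1
  apply List.map_congr_left
  intro c _
  exact pv_per_char c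

-- toList commutes with the fold of single-character replaces
theorem pv_key :
    ∀ (L : List Char) (t : String),
      (L.foldl (fun t c => PySem.Str.replace t (String.ofList [c]) (String.ofList ['\\', c])) t).toList
        = L.foldl (fun u c => pvReplC c ['\\', c] u) t.toList
  | [], t => by simp
  | c :: L, t => by
    simp only [List.foldl_cons]
    rw [pv_key L]
    congr 1
    rw [PySem.Str.toList_replace]
    simp only [String.toList_ofList]
    exact pv_replace_single c ['\\', c] t.toList

set_option maxRecDepth 2048 in
theorem pv_b_toList (s : String) :
    (escape_custom_alt s).toList = s.toList.flatMap (pvEsc pvSpecials) := by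
  unfold escape_custom_alt
  rw [pv_specials, pv_key]
  have h := pv_fold_repl pvSpecials [] (by simp) (by decide)
    (fun c _ hbs => by subst hbs; exact ⟨rfl, rfl⟩) s.toList
  have he : pvEsc [] = fun ch => [ch] := funext fun ch => by simp [pvEsc]
  have h0 : s.toList.flatMap (pvEsc []) = s.toList := by rw [he]; simp
  rw [h0] at h
  simpa using h

-- ===== VERDICT (by name: the statement is the Claim_ definition above) =====
theorem escape_custom_spec : Claim_equal_escape_custom := by
  intro s _
  show escape_custom s = escape_custom_alt s
  have h : (escape_custom s).toList = (escape_custom_alt s).toList := by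
    rw [pv_a_toList, pv_b_toList]
  have h2 := congrArg String.ofList h
  rwa [String.ofList_toList, String.ofList_toList] at h2
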